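-- pv_equiv track=rewrite | github.com/RazerM/advent-of-code-2018 | aoc/day6.py | find_region_size
-- ===== SOURCE A (Python) =====
-- def manhattan(m, n):
--     return abs(m[0] - n[0]) + abs(m[1] - n[1])
--
-- def find_region_size(coords):
--     in_region = 0
--
--     max_x, max_y = map(max, zip(*coords))
--     min_x, min_y = map(min, zip(*coords))
--
--     for x in range(min_x, max_x + 1):
--         for y in range(min_y, max_y + 1):
--             total = 0
--             for cx, cy in coords:
--                 total += manhattan((cx, cy), (x, y))
--             if total < 10000:
--                 in_region += 1
--
--     return in_region
-- ===== SOURCE B (Python) =====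
-- def find_region_size(coords):
--     xs = [c[0] for c in coords]
--     ys = [c[1] for c in coords]
--     max_x, max_y = max(xs), max(ys)
--     min_x, min_y = min(xs), min(ys)
--     sx = [sum(abs(v - x) for v in xs) for x in range(min_x, max_x + 1)]
--     sy = [sum(abs(v - y) for v in ys) for y in range(min_y, max_y + 1)]
--     return sum(1 for a in sx for b in sy if a + b < 10000)
-- ===== Notes on version B (the rewrite author's own statement) =====
-- stated objective: faster
-- what changed: Manhattan distance separates per axis, so B precomputes the sum of |v-x| once per column and once per row, then counts cells by comparing the two precomputed sums, removing the per-cell scan over all N coordinates.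
import Mathlib
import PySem

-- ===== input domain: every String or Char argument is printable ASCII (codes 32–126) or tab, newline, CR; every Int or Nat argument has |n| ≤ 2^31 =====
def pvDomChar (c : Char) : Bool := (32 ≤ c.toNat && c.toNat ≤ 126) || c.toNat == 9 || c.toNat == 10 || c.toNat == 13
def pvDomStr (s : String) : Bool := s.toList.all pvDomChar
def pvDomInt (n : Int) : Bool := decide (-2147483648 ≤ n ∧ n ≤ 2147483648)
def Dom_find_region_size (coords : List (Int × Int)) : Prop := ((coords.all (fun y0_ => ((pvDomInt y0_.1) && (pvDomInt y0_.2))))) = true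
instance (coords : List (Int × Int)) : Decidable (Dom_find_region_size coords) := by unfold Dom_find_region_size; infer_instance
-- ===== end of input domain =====

-- B precomputes per-axis distance sums (Manhattan distance splits by axis) and counts
-- cells from the two precomputed lists, removing the per-cell scan over all coordinates.

-- ===== PORT A =====
-- abs(m[0]-n[0]) + abs(m[1]-n[1])
def pyManhattan (m n : Int × Int) : Int := |m.1 - n.1| + |m.2 - n.2|

def find_region_size (coords : List (Int × Int)) : Int :=
  match PySem.List.max? (coords.map Prod.fst) (fun v => v),
        PySem.List.max? (coords.map Prod.snd) (fun v => v),
        PySem.List.min? (coords.map Prod.fst) (fun v => v),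
        PySem.List.min? (coords.map Prod.snd) (fun v => v) with
  | some max_x, some max_y, some min_x, some min_y =>
      (PySem.List.pyRange min_x (max_x + 1) 1).foldl (fun in_region x =>
        (PySem.List.pyRange min_y (max_y + 1) 1).foldl (fun in_region y =>
          let total := coords.foldl (fun t c => t + pyManhattan (c.1, c.2) (x, y)) 0
          if total < 10000 then in_region + 1 else in_region) in_region) 0
  | _, _, _, _ => 0  -- unreachable under Pre_: Python raises on empty coords

-- ===== PORT B =====
def find_region_size_alt (coords : List (Int × Int)) : Int :=
  let xs := coords.map Prod.fst
  let ys := coords.map Prod.snd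
  match PySem.List.max? xs (fun v => v) with
  | none => 0  -- unreachable under Pre_: min/max of an empty list raises
  | some max_x =>
  match PySem.List.min? xs (fun v => v) with
  | none => 0
  | some min_x =>
  match PySem.List.max? ys (fun v => v) with
  | none => 0
  | some max_y =>
  match PySem.List.min? ys (fun v => v) with
  | none => 0
  | some min_y =>
      let sx := (PySem.List.pyRange min_x (max_x + 1) 1).map
        (fun x => xs.foldl (fun s v => s + |v - x|) 0)
      let sy := (PySem.List.pyRange min_y (max_y + 1) 1).map
        (fun y => ys.foldl (fun s v => s + |v - y|) 0)
      sx.foldl (fun acc a => sy.foldl (fun acc b =>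
        if a + b < 10000 then acc + 1 else acc) acc) 0

-- ===== PRECONDITION & SPEC =====
-- Pre_ excludes the empty list, on which Python A raises ValueError ('not enough values
-- to unpack' from the max over zip(*coords)); B raises there too (max of empty sequence).
def Pre_find_region_size (coords : List (Int × Int)) : Prop := coords ≠ []
instance (coords : List (Int × Int)) : Decidable (Pre_find_region_size coords) := by unfold Pre_find_region_size; infer_instance
def pvWitness_find_region_size : (List (Int × Int)) := [(1, 2), (4, 3)]

def Spec_find_region_size (coords : List (Int × Int)) (out : Int) : Prop := out = find_region_size_alt coords
instance (coords : List (Int × Int)) (out : Int) : Decidable (Spec_find_region_size coords out) := by unfold Spec_find_region_size; infer_instance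

-- ===== CLAIM (what is proved, stated in full; the proofs are below) =====
def Claim_equal_find_region_size : Prop := ∀ (coords : List (Int × Int)), Dom_find_region_size coords → Pre_find_region_size coords → Spec_find_region_size coords (find_region_size coords)

-- ===== LEMMAS AND PROOFS =====

-- running sum fold = initial value + sum of the mapped list
theorem pvFoldlAdd {α : Type} (h : α → Int) (l : List α) (a : Int) :
    l.foldl (fun t c => t + h c) a = a + (l.map h).sum := by
  induction l generalizing a with
  | nil => simp
  | cons x t ih => simp [ih, add_assoc]

-- the per-cell total of A splits into the two per-axis sums of B
theorem pvTotalSplit (coords : List (Int × Int)) (x y : Int) :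
    coords.foldl (fun t c => t + pyManhattan (c.1, c.2) (x, y)) 0
      = (coords.map Prod.fst).foldl (fun s v => s + |v - x|) 0
        + (coords.map Prod.snd).foldl (fun s v => s + |v - y|) 0 := by
  rw [pvFoldlAdd, pvFoldlAdd, pvFoldlAdd]
  simp only [zero_add, List.map_map]
  induction coords with
  | nil => simp
  | cons c t ih =>
      simp only [List.map_cons, List.sum_cons, Function.comp_def] at *
      simp only [pyManhattan] at *
      simp [abs_sub_comm] at *
      omega

-- ===== VERDICT (by name: the statement is the Claim_ definition above) =====
theorem find_region_size_spec : Claim_equal_find_region_size := by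
  intro coords _ _
  unfold Spec_find_region_size find_region_size find_region_size_alt
  cases hmx : PySem.List.max? (coords.map Prod.fst) (fun v => v) with
  | none => simp [hmx]
  | some mx =>
    cases hnx : PySem.List.min? (coords.map Prod.fst) (fun v => v) with
    | none => simp [hmx, hnx]
    | some nx =>
      cases hmy : PySem.List.max? (coords.map Prod.snd) (fun v => v) with
      | none => simp [hmx, hnx, hmy]
      | some my =>
        cases hny : PySem.List.min? (coords.map Prod.snd) (fun v => v) with
        | none => simp [hmx, hnx, hmy, hny]
        | some ny =>
          simp only [hmx, hmy, hnx, hny, List.foldl_map]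
          have hinner : ∀ (x acc : Int),
              (PySem.List.pyRange ny (my + 1) 1).foldl (fun in_region y =>
                if List.foldl (fun t c => t + pyManhattan (c.1, c.2) (x, y)) 0 coords < 10000
                then in_region + 1 else in_region) acc
            = (PySem.List.pyRange ny (my + 1) 1).foldl (fun acc y =>
                if List.foldl (fun s c => s + |c.1 - x|) 0 coords
                    + List.foldl (fun s c => s + |c.2 - y|) 0 coords < 10000
                then acc + 1 else acc) acc := by
            intro x acc
            apply PySem.List.foldl_congr_mem
            intro a y _
            rw [pvTotalSplit, List.foldl_map, List.foldl_map]
          apply PySem.List.foldl_congr_mem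
          intro acc x _
          exact hinner x acc
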